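-- pv_equiv track=rewrite | github.com/pypi-data/pypi-mirror-401 | packages/bright-cli/bright_cli-0.1.0-py3-none-any.whl/bright_cli/__init__.py | _extract_error_headers
-- ===== SOURCE A (Python) =====
-- from typing import Any, AsyncIterator, BinaryIO, Dict, List, Mapping, Optional
--
-- def _extract_error_headers(
--     h: Dict[str, str],
-- ) -> tuple[Optional[str], Optional[str], Optional[str]]:
--     # BrightData may use either x-brd-* or older x-luminati-*.
--     code = h.get("x-brd-error-code") or h.get("x-luminati-error-code")
--     msg = h.get("x-brd-error") or h.get("x-luminati-error")
--     req_id = None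
--     dbg = h.get("x-brd-debug")
--     if dbg:
--         # dbg looks like: "req_id=...; bytes_up=...; ..."
--         parts = [p.strip() for p in dbg.split(";")]
--         for p in parts:
--             if p.startswith("req_id="):
--                 req_id = p.split("=", 1)[1].strip()
--                 break
--     return code, msg, req_id
-- ===== SOURCE B (Python) =====
-- _WANTED = ("x-brd-error-code", "x-luminati-error-code",
--            "x-brd-error", "x-luminati-error", "x-brd-debug")
--
--
-- def _extract_error_headers(h):
--     # One pass over the header items collects the relevant headers into a
--     # first-wins table; the debug string likewise becomes a first-wins k=v
--     # table that is then looked up for req_id.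
--     slots = {}
--     for k, v in h.items():
--         if k in _WANTED:
--             slots.setdefault(k, v)
--
--     def pick(a, b):
--         return slots.get(a) if slots.get(a) else slots.get(b)
--
--     req_id = None
--     dbg = slots.get("x-brd-debug")
--     if dbg:
--         table = {}
--         for raw in dbg.split(";"):
--             part = raw.strip()
--             if "=" in part:
--                 key, value = part.split("=", 1)
--                 table.setdefault(key, value.strip())
--         req_id = table.get("req_id")
--     return (pick("x-brd-error-code", "x-luminati-error-code"),
--             pick("x-brd-error", "x-luminati-error"),
--             req_id)
-- ===== Notes on version B (the rewrite author's own statement) =====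
-- stated objective: alternative
-- what changed: Instead of four h.get calls and a scan-with-break over the debug parts, B makes one pass over the header items collecting the five relevant keys into a first-wins table, and parses the whole debug string into a first-wins key->value table that is then looked up for req_id.
import Mathlib
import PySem

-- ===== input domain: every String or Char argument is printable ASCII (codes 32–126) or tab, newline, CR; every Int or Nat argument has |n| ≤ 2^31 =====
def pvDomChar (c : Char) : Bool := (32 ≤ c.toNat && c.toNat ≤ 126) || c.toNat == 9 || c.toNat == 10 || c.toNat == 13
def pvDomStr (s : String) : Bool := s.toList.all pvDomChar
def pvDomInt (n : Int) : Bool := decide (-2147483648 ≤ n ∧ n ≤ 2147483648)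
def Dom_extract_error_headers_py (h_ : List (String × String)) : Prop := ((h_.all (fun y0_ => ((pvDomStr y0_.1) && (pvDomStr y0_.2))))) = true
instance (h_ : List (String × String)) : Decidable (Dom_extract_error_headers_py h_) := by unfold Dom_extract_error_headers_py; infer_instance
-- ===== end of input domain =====

-- B replaces A's four h.get calls and scan-with-break by one pass over the items into a first-wins slots table plus a first-wins k=v table for the debug string (alternative; same cost).

-- ===== PORT A =====
-- h.get(k) on the dict (assoc list, first match)
def pvAget (h : List (String × String)) (k : String) : Option String :=
  PySem.Dict.get? (PySem.Dict.mk h) k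

-- Python 'x or y' on Optional[str] ('' and None are falsy)
def pvAor (a b : Option String) : Option String :=
  match a with
  | some s => if s = "" then b else some s
  | none => b

-- the for-loop with break: first part starting with "req_id="
def pvAfind : List String → Option String
  | [] => none
  | p :: rest =>
    if PySem.Str.startswith p "req_id=" then
      -- p.split("=", 1)[1]: index 1 always exists here since p contains '='
      some (PySem.Str.strip (((PySem.Str.splitMax? p "=" 1).getD []).getD 1 ""))
    else pvAfind rest

def extract_error_headers_py (h_ : List (String × String)) : Option String × Option String × Option String :=
  let code := pvAor (pvAget h_ "x-brd-error-code") (pvAget h_ "x-luminati-error-code")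
  let msg := pvAor (pvAget h_ "x-brd-error") (pvAget h_ "x-luminati-error")
  let req_id :=
    match pvAget h_ "x-brd-debug" with
    | none => none
    | some d =>
      if d = "" then none
      else pvAfind (((PySem.Str.split? d ";").getD []).map PySem.Str.strip)
  (code, msg, req_id)

-- ===== PORT B =====
def pvBwanted : List String :=
  ["x-brd-error-code", "x-luminati-error-code", "x-brd-error", "x-luminati-error", "x-brd-debug"]

-- one iteration of the slots loop: keep a wanted header the first time its key is seen
def pvBcollect (s : PySem.Dict String String) (kv : String × String) : PySem.Dict String String :=
  if kv.1 ∈ pvBwanted then s.setdefault kv.1 kv.2 else s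

-- pick(a, b): slots.get(a) if truthy, else slots.get(b)
def pvBpick (slots : PySem.Dict String String) (a b : String) : Option String :=
  if ((slots.get? a).getD "") ≠ "" then slots.get? a else slots.get? b

-- one iteration of the table loop: strip the raw part; if it has '=', setdefault key -> stripped value
def pvBtable (t : PySem.Dict String String) (raw : String) : PySem.Dict String String :=
  let part := PySem.Str.strip raw
  if PySem.Str.isIn "=" part then
    let pieces := (PySem.Str.splitMax? part "=" 1).getD []
    t.setdefault (pieces.getD 0 "") (PySem.Str.strip (pieces.getD 1 ""))
  else t

def extract_error_headers_py_alt (h_ : List (String × String)) : Option String × Option String × Option String :=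
  let slots := h_.foldl pvBcollect PySem.Dict.empty
  let req_id :=
    match slots.get? "x-brd-debug" with
    | none => none
    | some d =>
      if d = "" then none
      else (((PySem.Str.split? d ";").getD []).foldl pvBtable PySem.Dict.empty).get? "req_id"
  (pvBpick slots "x-brd-error-code" "x-luminati-error-code",
   pvBpick slots "x-brd-error" "x-luminati-error",
   req_id)

-- ===== PRECONDITION & SPEC =====
def Spec_extract_error_headers_py (h_ : List (String × String)) (out : Option String × Option String × Option String) : Prop := out = extract_error_headers_py_alt h_
instance (h_ : List (String × String)) (out : Option String × Option String × Option String) : Decidable (Spec_extract_error_headers_py h_ out) := by unfold Spec_extract_error_headers_py; infer_instance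

-- ===== CLAIM (what is proved, stated in full; the proofs are below) =====
def Claim_equal_extract_error_headers_py : Prop := ∀ (h_ : List (String × String)), Dom_extract_error_headers_py h_ → Spec_extract_error_headers_py h_ (extract_error_headers_py h_)

-- ===== LEMMAS AND PROOFS =====
theorem pvAget_cons (a v : String) (rest : List (String × String)) (k : String) :
    pvAget ((a, v) :: rest) k = if a == k then some v else pvAget rest k := by
  unfold pvAget
  exact PySem.Dict.get?_mk_cons a v rest k

theorem pv_slots (k : String) (hk : k ∈ pvBwanted) : ∀ (h_ : List (String × String)) (d : PySem.Dict String String),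
    (h_.foldl pvBcollect d).get? k = (d.get? k).or (pvAget h_ k) := by
  intro h_
  induction h_ with
  | nil =>
    intro d
    simp [pvAget, PySem.Dict.get?]
  | cons kv rest ih =>
    intro d
    obtain ⟨a, v⟩ := kv
    rw [List.foldl_cons]
    rw [pvAget_cons]
    by_cases hak : a = k
    · subst hak
      rw [if_pos (by simp)]
      rw [show pvBcollect d (a, v) = d.setdefault a v from by simp [pvBcollect, hk]]
      rw [ih, PySem.Dict.get?_setdefault_self]
      cases d.get? a <;> rfl
    · rw [if_neg (by simpa using hak)]
      by_cases haw : a ∈ pvBwanted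
      · rw [show pvBcollect d (a, v) = d.setdefault a v from by simp [pvBcollect, haw]]
        rw [ih, PySem.Dict.get?_setdefault_of_ne _ _ (fun he => hak he.symm)]
      · rw [show pvBcollect d (a, v) = d from by simp [pvBcollect, haw]]
        exact ih d

theorem pv_pick (slots : PySem.Dict String String) (h_ : List (String × String)) (a b : String)
    (ha : slots.get? a = pvAget h_ a) (hb : slots.get? b = pvAget h_ b) :
    pvAor (pvAget h_ a) (pvAget h_ b) = pvBpick slots a b := by
  rw [← ha, ← hb]
  unfold pvAor pvBpick
  cases hx : slots.get? a with
  | none => simp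
  | some s =>
    by_cases hs : s = "" <;> simp [hs]

theorem pv_go_zero (l cur : List Char) (acc : List (List Char)) (f : Nat) (hf : 0 < f) :
    PySem.Chars.splitOnMax.go ['='] f 0 l cur acc = ((cur.reverse ++ l) :: acc).reverse := by
  obtain ⟨f, rfl⟩ := Nat.exists_eq_succ_of_ne_zero hf.ne'
  cases l with
  | nil => simp [PySem.Chars.splitOnMax.go]
  | cons c rest => simp [PySem.Chars.splitOnMax.go]

theorem pv_go_one (l : List Char) : ∀ (cur : List Char) (acc : List (List Char)) (f : Nat), l.length < f →
    PySem.Chars.splitOnMax.go ['='] f 1 l cur acc =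
      acc.reverse ++ (if '=' ∈ l
        then [cur.reverse ++ l.takeWhile (· ≠ '='), (l.dropWhile (· ≠ '=')).tail]
        else [cur.reverse ++ l]) := by
  induction l with
  | nil =>
    intro cur acc f hf
    obtain ⟨f, rfl⟩ := Nat.exists_eq_succ_of_ne_zero (by omega : f ≠ 0)
    simp [PySem.Chars.splitOnMax.go]
  | cons c rest ih =>
    intro cur acc f hf
    obtain ⟨f, rfl⟩ := Nat.exists_eq_succ_of_ne_zero (by omega : f ≠ 0)
    have h1 : (0:Nat) < f := by simp at hf; omega
    have h2 : rest.length < f := by simp at hf; omega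
    by_cases hc : c = '='
    · subst hc
      simp only [PySem.Chars.splitOnMax.go]
      simp only [if_neg (by omega : ¬(1:Nat)=0)]
      rw [pv_go_zero _ _ _ _ h1]
      simp [List.takeWhile, List.dropWhile]
    · simp only [PySem.Chars.splitOnMax.go]
      simp only [if_neg (by omega : ¬(1:Nat)=0)]
      rw [if_neg (by simp; exact Ne.symm hc)]
      rw [ih (c :: cur) acc f h2]
      simp [List.takeWhile, List.dropWhile, Ne.symm hc, hc]

theorem pv_splitOnMax_one (cs : List Char) :
    PySem.Chars.splitOnMax cs ['='] 1 =
      if '=' ∈ cs then [cs.takeWhile (· ≠ '='), (cs.dropWhile (· ≠ '=')).tail] else [cs] := by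
  rw [PySem.Chars.splitOnMax, if_neg (by omega)]
  rw [show ((1:Int).toNat) = 1 from rfl, pv_go_one cs [] [] (cs.length+1) (by omega)]
  simp

theorem pv_isIn_eq (s : String) : PySem.Str.isIn "=" s = true ↔ '=' ∈ s.toList := by
  rw [show PySem.Str.isIn "=" s = PySem.Chars.isIn "=".toList s.toList from by simp]
  rw [PySem.Chars.isIn_iff_infix]
  constructor
  · intro h
    exact h.mem (by simp [show ("=":String).toList = ['='] from rfl])
  · intro h
    obtain ⟨l1, l2, he⟩ := List.append_of_mem h
    exact ⟨l1, l2, by simp [he]⟩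

theorem pv_key_iff (s : String) :
    PySem.Str.startswith s "req_id=" = true ↔
      ('=' ∈ s.toList ∧ s.toList.takeWhile (· ≠ '=') = "req_id".toList) := by
  rw [show PySem.Str.startswith s "req_id=" = PySem.Chars.startswith s.toList "req_id=".toList from by simp]
  rw [PySem.Chars.startswith_iff]
  constructor
  · intro h
    obtain ⟨t, ht⟩ := h
    rw [show ("req_id=":String).toList = 'r'::'e'::'q'::'_'::'i'::'d'::'='::[] from rfl] at ht
    rw [← ht]
    refine ⟨by simp, ?_⟩
    simp [List.takeWhile]
  · rintro ⟨hmem, htw⟩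
    have hd : s.toList.dropWhile (· ≠ '=') ≠ [] := by
      intro hnil
      have := List.dropWhile_eq_nil_iff.mp hnil
      simpa using this '=' hmem
    have hhead : (s.toList.dropWhile (· ≠ '=')).head hd = '=' := by
      have h' := List.head_dropWhile_not (fun x => decide (x ≠ '=')) hd
      rw [decide_eq_false_iff_not, not_not] at h'
      exact h'
    have hsplit : s.toList = s.toList.takeWhile (· ≠ '=') ++ s.toList.dropWhile (· ≠ '=') :=
      (List.takeWhile_append_dropWhile).symm
    refine ⟨(s.toList.dropWhile (· ≠ '=')).tail, ?_⟩
    rw [hsplit, htw]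
    have h2 : s.toList.dropWhile (· ≠ '=') = '=' :: (s.toList.dropWhile (· ≠ '=')).tail := by
      conv_lhs => rw [← List.cons_head_tail hd]
      rw [hhead]
    rw [h2]
    rfl

theorem pv_pieces (s : String) (h : '=' ∈ s.toList) :
    (PySem.Str.splitMax? s "=" 1).getD [] =
      [String.ofList (s.toList.takeWhile (· ≠ '=')), String.ofList ((s.toList.dropWhile (· ≠ '=')).tail)] := by
  rw [show PySem.Str.splitMax? s "=" 1
        = Option.map (List.map String.ofList) (PySem.Chars.splitMax? s.toList ['='] 1) from rfl]
  rw [show PySem.Chars.splitMax? s.toList ['='] 1 = some (PySem.Chars.splitOnMax s.toList ['='] 1) from by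
        simp [PySem.Chars.splitMax?]]
  rw [pv_splitOnMax_one, if_pos h]
  rfl

theorem pv_loop (ps : List String) : ∀ (t : PySem.Dict String String),
    PySem.Dict.get? (ps.foldl pvBtable t) "req_id" =
      (PySem.Dict.get? t "req_id").or (pvAfind (ps.map PySem.Str.strip)) := by
  induction ps with
  | nil => intro t; simp [pvAfind]
  | cons p rest ih =>
    intro t
    rw [List.foldl_cons, ih, List.map_cons]
    by_cases hsw : PySem.Str.startswith (PySem.Str.strip p) "req_id=" = true
    · obtain ⟨hmem, htw⟩ := (pv_key_iff _).mp hsw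
      have hin : PySem.Str.isIn "=" (PySem.Str.strip p) = true := (pv_isIn_eq _).mpr hmem
      have hkey : ((PySem.Str.splitMax? (PySem.Str.strip p) "=" 1).getD []).getD 0 "" = "req_id" := by
        rw [pv_pieces _ hmem, htw]; rfl
      rw [show pvBtable t p
            = t.setdefault "req_id"
                (PySem.Str.strip (((PySem.Str.splitMax? (PySem.Str.strip p) "=" 1).getD []).getD 1 "")) from by
            simp only [pvBtable, hin, if_pos, hkey]]
      rw [PySem.Dict.get?_setdefault_self]
      rw [show pvAfind (PySem.Str.strip p :: rest.map PySem.Str.strip)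
            = some (PySem.Str.strip (((PySem.Str.splitMax? (PySem.Str.strip p) "=" 1).getD []).getD 1 "")) from by
            simp only [pvAfind]; rw [if_pos hsw]]
      cases PySem.Dict.get? t "req_id" <;> rfl
    · have haf : pvAfind (PySem.Str.strip p :: rest.map PySem.Str.strip)
          = pvAfind (rest.map PySem.Str.strip) := by
        simp only [pvAfind]; rw [if_neg hsw]
      rw [haf]
      by_cases hin : PySem.Str.isIn "=" (PySem.Str.strip p) = true
      · have hne : ("req_id" : String) ≠ ((PySem.Str.splitMax? (PySem.Str.strip p) "=" 1).getD []).getD 0 "" := by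
          intro he
          have hmem := (pv_isIn_eq _).mp hin
          rw [pv_pieces _ hmem] at he
          have : (PySem.Str.strip p).toList.takeWhile (· ≠ '=') = "req_id".toList := by
            have := congrArg String.toList he
            simpa using this.symm
          exact hsw ((pv_key_iff _).mpr ⟨hmem, this⟩)
        rw [show pvBtable t p
              = t.setdefault (((PySem.Str.splitMax? (PySem.Str.strip p) "=" 1).getD []).getD 0 "")
                  (PySem.Str.strip (((PySem.Str.splitMax? (PySem.Str.strip p) "=" 1).getD []).getD 1 "")) from by
              simp only [pvBtable, hin, if_pos]]
        rw [PySem.Dict.get?_setdefault_of_ne _ _ hne]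
      · rw [show pvBtable t p = t from by simp only [pvBtable]; rw [if_neg hin]]

theorem pv_req (d : String) :
    PySem.Dict.get? (((PySem.Str.split? d ";").getD []).foldl pvBtable PySem.Dict.empty) "req_id"
      = pvAfind (((PySem.Str.split? d ";").getD []).map PySem.Str.strip) := by
  rw [pv_loop]
  simp [PySem.Dict.empty, PySem.Dict.get?]

theorem pv_slots_empty (h_ : List (String × String)) (k : String) (hk : k ∈ pvBwanted) :
    (h_.foldl pvBcollect PySem.Dict.empty).get? k = pvAget h_ k := by
  rw [pv_slots k hk h_ PySem.Dict.empty]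
  simp [PySem.Dict.empty, PySem.Dict.get?]

-- ===== VERDICT (by name: the statement is the Claim_ definition above) =====
theorem extract_error_headers_py_spec : Claim_equal_extract_error_headers_py := by
  intro h_ _
  unfold Spec_extract_error_headers_py
  show extract_error_headers_py h_ = extract_error_headers_py_alt h_
  dsimp only [extract_error_headers_py, extract_error_headers_py_alt]
  simp only [Prod.mk.injEq]
  refine ⟨?_, ?_, ?_⟩
  · exact pv_pick _ h_ _ _ (pv_slots_empty h_ _ (by simp [pvBwanted]))
      (pv_slots_empty h_ _ (by simp [pvBwanted]))
  · exact pv_pick _ h_ _ _ (pv_slots_empty h_ _ (by simp [pvBwanted]))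
      (pv_slots_empty h_ _ (by simp [pvBwanted]))
  · rw [pv_slots_empty h_ "x-brd-debug" (by simp [pvBwanted])]
    cases pvAget h_ "x-brd-debug" with
    | none => rfl
    | some d =>
      by_cases hd : d = ""
      · simp [hd]
      · simp only [if_neg hd]
        exact (pv_req d).symm
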